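-- pv_equiv track=rewrite | github.com/KJAdams2000/AceCG | src/AceCG/schedulers/task_runner.py | _merge_engine_args
-- ===== SOURCE A (Python) =====
-- def _merge_engine_args(argv: list[str], engine_args: list[str]) -> list[str]:
--     """Append *engine_args* to each MPMD segment in *argv*.
--
--     Intel Hydra MPMD argv uses ``":"`` tokens to separate segments.
--     If no ``":"`` is present, fall back to simple concatenation.
--     """
--     if ":" not in argv:
--         return argv + engine_args
--     # Split argv into segments delimited by ":"
--     segments: list[list[str]] = [[]]
--     for tok in argv:
--         if tok == ":":
--             segments.append([])
--         else:
--             segments[-1].append(tok)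
--     # Append engine_args to each segment, rejoin with ":"
--     out: list[str] = []
--     for i, seg in enumerate(segments):
--         if i > 0:
--             out.append(":")
--         out.extend(seg + engine_args)
--     return out
-- ===== SOURCE B (Python) =====
-- def _merge_engine_args(argv: list[str], engine_args: list[str]) -> list[str]:
--     """Single pass: emit engine_args before every ":" separator and once at the end."""
--     out: list[str] = []
--     for tok in argv:
--         if tok == ":":
--             out.extend(engine_args)
--             out.append(":")
--         else:
--             out.append(tok)
--     out.extend(engine_args)
--     return out
-- ===== Notes on version B (the rewrite author's own statement) =====
-- stated objective: simpler
-- what changed: Replaces the two-pass split-into-segments-then-rejoin (with a separate no-colon fallback branch) by a single loop that emits engine_args before each ':' token and once after the loop.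
import Mathlib
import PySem

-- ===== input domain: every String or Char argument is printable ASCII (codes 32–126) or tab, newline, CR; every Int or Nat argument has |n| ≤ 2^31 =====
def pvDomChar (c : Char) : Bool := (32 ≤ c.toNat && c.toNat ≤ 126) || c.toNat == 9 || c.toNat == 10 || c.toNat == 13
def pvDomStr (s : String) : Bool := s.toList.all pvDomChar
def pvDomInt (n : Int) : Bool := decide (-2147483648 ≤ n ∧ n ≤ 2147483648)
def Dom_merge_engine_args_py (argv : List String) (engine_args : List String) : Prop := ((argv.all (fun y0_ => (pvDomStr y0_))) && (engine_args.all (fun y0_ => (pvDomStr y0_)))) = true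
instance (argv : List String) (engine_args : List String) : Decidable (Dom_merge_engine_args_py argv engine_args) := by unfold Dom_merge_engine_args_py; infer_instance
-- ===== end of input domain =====

-- B replaces A's two-pass split-into-segments-then-rejoin (plus a separate no-colon fallback)
-- by one loop emitting engine_args before each ":" and once at the end (objective: simpler).

-- ===== PORT A =====
-- segments[-1].append(tok): append tok to the last segment
def pvPushLast : List (List String) → String → List (List String)
  | [], _ => []
  | [s], tok => [s ++ [tok]]
  | s :: rest, tok => s :: pvPushLast rest tok

-- body of A's first loop
def pvSegStep (segs : List (List String)) (tok : String) : List (List String) :=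
  if tok = ":" then segs ++ [[]] else pvPushLast segs tok

def merge_engine_args_py (argv : List String) (engine_args : List String) : List String :=
  if ":" ∉ argv then argv ++ engine_args
  else
    let segments : List (List String) := argv.foldl pvSegStep [[]]
    (PySem.List.enumerate segments).foldl
      (fun out p => (if p.1 > 0 then out ++ [":"] else out) ++ (p.2 ++ engine_args)) []

-- ===== PORT B =====
def merge_engine_args_py_alt (argv : List String) (engine_args : List String) : List String :=
  (argv.foldl
    (fun out tok => if tok = ":" then out ++ engine_args ++ [":"] else out ++ [tok]) [])
  ++ engine_args

-- ===== PRECONDITION & SPEC =====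
def Spec_merge_engine_args_py (argv : List String) (engine_args : List String) (out : List String) : Prop := out = merge_engine_args_py_alt argv engine_args
instance (argv : List String) (engine_args : List String) (out : List String) : Decidable (Spec_merge_engine_args_py argv engine_args out) := by unfold Spec_merge_engine_args_py; infer_instance

-- ===== CLAIM (what is proved, stated in full; the proofs are below) =====
def Claim_equal_merge_engine_args_py : Prop := ∀ (argv : List String) (engine_args : List String), Dom_merge_engine_args_py argv engine_args → Spec_merge_engine_args_py argv engine_args (merge_engine_args_py argv engine_args)

-- ===== LEMMAS AND PROOFS =====

-- the common recursive shape both programs compute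
def pvSpec (E : List String) : List String → List String
  | [] => E
  | tok :: rest => if tok = ":" then E ++ ":" :: pvSpec E rest else tok :: pvSpec E rest

-- A's segment split, read head-first
def pvF : List String → List String → List (List String)
  | c, [] => [c]
  | c, tok :: rest => if tok = ":" then c :: pvF [] rest else pvF (c ++ [tok]) rest

-- rendering of the trailing segments (index ≥ 1) in A's second loop
def pvRT (E : List String) : List (List String) → List String
  | [] => []
  | seg :: rest => ":" :: (seg ++ E ++ pvRT E rest)

theorem pvB_foldl (E : List String) : ∀ (argv acc : List String),
    argv.foldl (fun out tok => if tok = ":" then out ++ E ++ [":"] else out ++ [tok]) acc ++ E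
      = acc ++ pvSpec E argv := by
  intro argv
  induction argv with
  | nil => intro acc; simp [pvSpec]
  | cons tok rest ih =>
    intro acc
    by_cases h : tok = ":"
    · simp only [List.foldl_cons, h, reduceIte]
      rw [ih]; simp [pvSpec]
    · simp only [List.foldl_cons, if_neg h]
      rw [ih]; simp [pvSpec, h]

theorem pvSpec_no_colon (E : List String) : ∀ (argv : List String), ":" ∉ argv →
    pvSpec E argv = argv ++ E := by
  intro argv
  induction argv with
  | nil => simp [pvSpec]
  | cons tok rest ih =>
    intro h
    have h1 : tok ≠ ":" := fun he => h (he ▸ List.mem_cons_self)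
    have h2 : ":" ∉ rest := fun hm => h (List.mem_cons_of_mem _ hm)
    simp [pvSpec, h1, ih h2]

theorem pvPushLast_ne_nil : ∀ (segs : List (List String)) (tok : String),
    segs ≠ [] → pvPushLast segs tok ≠ [] := by
  intro segs tok h
  match segs with
  | [s] => simp [pvPushLast]
  | s :: t :: r => simp [pvPushLast]

theorem pvPushLast_append : ∀ (S segs : List (List String)) (tok : String),
    segs ≠ [] → pvPushLast (S ++ segs) tok = S ++ pvPushLast segs tok := by
  intro S
  induction S with
  | nil => intro segs tok _; rfl
  | cons s S' ih =>
    intro segs tok h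
    match hS : S' ++ segs with
    | [] => exact absurd (List.append_eq_nil_iff.mp hS).2 h
    | t :: r =>
      show pvPushLast (s :: (S' ++ segs)) tok = _
      rw [hS]
      show s :: pvPushLast (t :: r) tok = _
      rw [← hS, ih segs tok h]; simp

theorem pvSegStep_ne_nil (segs : List (List String)) (tok : String) (h : segs ≠ []) :
    pvSegStep segs tok ≠ [] := by
  unfold pvSegStep
  split
  · simp
  · exact pvPushLast_ne_nil segs tok h

theorem pvSegStep_append (S segs : List (List String)) (tok : String) (h : segs ≠ []) :
    pvSegStep (S ++ segs) tok = S ++ pvSegStep segs tok := by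
  unfold pvSegStep
  split
  · simp
  · exact pvPushLast_append S segs tok h

theorem pvFoldl_segStep_append : ∀ (argv : List String) (S segs : List (List String)),
    segs ≠ [] → List.foldl pvSegStep (S ++ segs) argv = S ++ List.foldl pvSegStep segs argv := by
  intro argv
  induction argv with
  | nil => intro S segs _; rfl
  | cons tok rest ih =>
    intro S segs h
    simp only [List.foldl_cons]
    rw [pvSegStep_append S segs tok h, ih S _ (pvSegStep_ne_nil segs tok h)]

theorem pvFoldl_eq_pvF : ∀ (argv c : List String),
    List.foldl pvSegStep [c] argv = pvF c argv := by
  intro argv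
  induction argv with
  | nil => intro c; rfl
  | cons tok rest ih =>
    intro c
    simp only [List.foldl_cons]
    by_cases h : tok = ":"
    · have : pvSegStep [c] tok = [c] ++ [[]] := by simp [pvSegStep, h]
      rw [this, pvFoldl_segStep_append rest [c] [[]] (by simp), ih [], pvF]
      simp [h]
    · have : pvSegStep [c] tok = [c ++ [tok]] := by simp [pvSegStep, pvPushLast, h]
      rw [this, ih, pvF]
      simp [h]

theorem pvF_render (E : List String) : ∀ (argv c : List String),
    ∃ (h : List String) (t : List (List String)),
      pvF c argv = h :: t ∧ h ++ E ++ pvRT E t = c ++ pvSpec E argv := by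
  intro argv
  induction argv with
  | nil => intro c; exact ⟨c, [], rfl, by simp [pvRT, pvSpec]⟩
  | cons tok rest ih =>
    intro c
    by_cases hc : tok = ":"
    · obtain ⟨h, t, hft, hrt⟩ := ih []
      refine ⟨c, h :: t, by simp [pvF, hc, hft], ?_⟩
      simp only [pvRT, pvSpec, hc]
      simp only [List.nil_append] at hrt
      simp [hrt]
    · obtain ⟨h, t, hft, hrt⟩ := ih (c ++ [tok])
      refine ⟨h, t, by simp [pvF, hc, hft], ?_⟩
      simp [pvSpec, hc, hrt]

theorem pvRT_foldl (E : List String) : ∀ (t : List (List String)) (acc : List String) (s : Int),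
    1 ≤ s →
    (PySem.List.enumerate t s).foldl
      (fun out p => (if p.1 > 0 then out ++ [":"] else out) ++ (p.2 ++ E)) acc
      = acc ++ pvRT E t := by
  intro t
  induction t with
  | nil => intro acc s _; simp [PySem.List.enumerate_nil, pvRT]
  | cons seg rest ih =>
    intro acc s hs
    rw [PySem.List.enumerate_cons, List.foldl_cons]
    have hpos : (0 : Int) < s := lt_of_lt_of_le one_pos hs
    rw [ih _ (s + 1) (by omega)]
    simp [hpos, pvRT]

theorem pvA_colon (E : List String) (segs : List (List String)) (h : List String)
    (t : List (List String)) (hseg : segs = h :: t) :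
    (PySem.List.enumerate segs).foldl
      (fun out p => (if p.1 > 0 then out ++ [":"] else out) ++ (p.2 ++ E)) []
      = h ++ E ++ pvRT E t := by
  subst hseg
  rw [PySem.List.enumerate_cons, List.foldl_cons]
  rw [pvRT_foldl E t _ (0 + 1) (by omega)]
  simp

-- ===== VERDICT (by name: the statement is the Claim_ definition above) =====
theorem merge_engine_args_py_spec : Claim_equal_merge_engine_args_py := by
  intro argv E _
  show merge_engine_args_py argv E = merge_engine_args_py_alt argv E
  have hB : merge_engine_args_py_alt argv E = pvSpec E argv := by
    have := pvB_foldl E argv []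
    simpa [merge_engine_args_py_alt] using this
  unfold merge_engine_args_py
  by_cases hmem : ":" ∈ argv
  · simp only [hmem, not_true_eq_false, if_false]
    obtain ⟨h, t, hft, hrt⟩ := pvF_render E argv []
    have hsegs : argv.foldl pvSegStep [[]] = h :: t := by
      rw [pvFoldl_eq_pvF argv []]; exact hft
    rw [pvA_colon E _ h t hsegs, hrt, hB]
    simp
  · simp only [hmem, not_false_eq_true, if_true]
    rw [hB, pvSpec_no_colon E argv hmem]
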